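-- pv_equiv track=rewrite | github.com/cltl/WSD_error_analysis | lib/utils.py | one_sense_used
-- ===== SOURCE A (Python) =====
-- def one_sense_used(lijst):
--     senses = []
--     for uri,list_senses,sentence in lijst:
--         for sense in list_senses:
--             senses.append(sense)
--
--     num_instances = len(lijst)
--
--     max_count = 0
--     for sense in set(senses):
--         count = senses.count(sense)
--         if count > max_count:
--             max_count = count
--
--     not_predominant = num_instances-max_count
--     return (max_count < num_instances,not_predominant)
-- ===== SOURCE B (Python) =====
-- def one_sense_used(lijst):
--     # Sort the flattened senses, then find the mode as the longest run in one
--     # scan (equal senses are adjacent after sorting), instead of rescanning the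
--     # whole list per distinct sense as A does.
--     senses = sorted(s for _, list_senses, _ in lijst for s in list_senses)
--     num_instances = len(lijst)
--     max_count = 0
--     run = 0
--     prev = None
--     for s in senses:
--         if s == prev:
--             run += 1
--         else:
--             prev = s
--             run = 1
--         if run > max_count:
--             max_count = run
--     return (max_count < num_instances, num_instances - max_count)
-- ===== Notes on version B (the rewrite author's own statement) =====
-- stated objective: faster
-- what changed: Instead of A's set+per-distinct-sense .count rescans of the flattened list, B sorts the flattened senses once and finds the mode as the longest run of equal adjacent elements in a single scan.
import Mathlib
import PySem

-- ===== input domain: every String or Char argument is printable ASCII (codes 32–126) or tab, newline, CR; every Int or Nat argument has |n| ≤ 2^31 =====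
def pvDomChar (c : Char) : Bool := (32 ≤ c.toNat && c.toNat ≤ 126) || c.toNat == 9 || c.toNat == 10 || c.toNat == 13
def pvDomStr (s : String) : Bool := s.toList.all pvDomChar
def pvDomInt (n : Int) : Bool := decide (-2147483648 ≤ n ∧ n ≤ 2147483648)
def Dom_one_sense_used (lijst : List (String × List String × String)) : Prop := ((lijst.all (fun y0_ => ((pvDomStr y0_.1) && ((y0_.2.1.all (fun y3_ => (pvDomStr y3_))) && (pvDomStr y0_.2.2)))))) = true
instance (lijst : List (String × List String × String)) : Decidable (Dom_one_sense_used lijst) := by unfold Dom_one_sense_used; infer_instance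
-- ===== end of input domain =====

-- B sorts the flattened senses once and finds the mode as the longest run of
-- equal adjacent elements in a single scan, instead of A's per-distinct-sense
-- .count rescans of the whole flattened list.

-- ===== PORT A =====
def one_sense_used (lijst : List (String × List String × String)) : Bool × Int :=
  let senses := lijst.foldl
    (fun acc t => t.2.1.foldl (fun acc2 sense => acc2 ++ [sense]) acc) []
  let num_instances : Int := lijst.length
  let max_count := (PySem.Set.ofList senses).foldl
    (fun m sense =>
      let count : Int := PySem.List.count senses sense
      if count > m then count else m) 0
  (max_count < num_instances, num_instances - max_count)

-- ===== PORT B =====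
-- B's run-length scan over the sorted senses (the for loop of Source B, with its
-- loop state prev/run/max_count carried through the recursion).
def pvScan : Option String → Int → Int → List String → Int
  | _, _, best, [] => best
  | prev, run, best, s :: t =>
    if some s == prev then
      pvScan prev (run + 1) (if run + 1 > best then run + 1 else best) t
    else
      pvScan (some s) 1 (if 1 > best then 1 else best) t

def one_sense_used_alt (lijst : List (String × List String × String)) : Bool × Int :=
  let senses := PySem.List.sorted (lijst.flatMap (fun t => t.2.1)) (fun s => s) false
  let num_instances : Int := lijst.length
  let max_count := pvScan none 0 0 senses
  (max_count < num_instances, num_instances - max_count)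

-- ===== PRECONDITION & SPEC =====
def Spec_one_sense_used (lijst : List (String × List String × String)) (out : Bool × Int) : Prop := out = one_sense_used_alt lijst
instance (lijst : List (String × List String × String)) (out : Bool × Int) : Decidable (Spec_one_sense_used lijst out) := by unfold Spec_one_sense_used; infer_instance

-- ===== CLAIM (what is proved, stated in full; the proofs are below) =====
def Claim_equal_one_sense_used : Prop := ∀ (lijst : List (String × List String × String)), Dom_one_sense_used lijst → Spec_one_sense_used lijst (one_sense_used lijst)

-- ===== LEMMAS AND PROOFS =====

theorem pv_snoc_loop (l : List String) (acc : List String) :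
    l.foldl (fun acc2 sense => acc2 ++ [sense]) acc = acc ++ l := by
  induction l generalizing acc with
  | nil => simp
  | cons x t ih => rw [List.foldl_cons, ih, List.append_assoc]; rfl

-- A's append loop flattens the sense lists.
theorem pv_flatten_A (lijst : List (String × List String × String)) (acc : List String) :
    lijst.foldl (fun acc t => t.2.1.foldl (fun acc2 sense => acc2 ++ [sense]) acc) acc
      = acc ++ lijst.flatMap (fun t => t.2.1) := by
  induction lijst generalizing acc with
  | nil => simp
  | cons t rest ih =>
    rw [List.foldl_cons, pv_snoc_loop, ih, List.flatMap_cons, List.append_assoc]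

-- foldl max algebra -----------------------------------------------------------

theorem pv_foldl_max_comm (l : List Int) (a c : Int) :
    l.foldl max (max a c) = max a (l.foldl max c) := by
  induction l generalizing c with
  | nil => simp
  | cons x t ih => rw [List.foldl_cons, List.foldl_cons, max_assoc, ih]

theorem pv_foldl_max_cons (x : Int) (l : List Int) :
    (x :: l).foldl max 0 = max x (l.foldl max 0) := by
  rw [List.foldl_cons, max_comm 0 x, pv_foldl_max_comm]

theorem pv_le_foldl_max (a : Int) (l : List Int) : a ≤ l.foldl max a := by
  induction l generalizing a with
  | nil => simp
  | cons x t ih => exact le_trans (le_max_left a x) (ih _)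

theorem pv_mem_le_foldl_max {x : Int} {l : List Int} (h : x ∈ l) (a : Int) :
    x ≤ l.foldl max a := by
  induction l generalizing a with
  | nil => cases h
  | cons y t ih =>
    rcases List.mem_cons.1 h with rfl | h'
    · exact le_trans (le_max_right a x) (pv_le_foldl_max _ t)
    · exact ih h' _

theorem pv_foldl_max_le {a c : Int} {l : List Int} (h : a ≤ c)
    (h2 : ∀ x ∈ l, x ≤ c) : l.foldl max a ≤ c := by
  induction l generalizing a with
  | nil => exact h
  | cons x t ih =>
    exact ih (max_le h (h2 x (by simp))) (fun y hy => h2 y (by simp [hy]))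

theorem pv_foldl_max_eq_of_mem_iff {l l' : List Int}
    (h : ∀ x, x ∈ l ↔ x ∈ l') : l.foldl max 0 = l'.foldl max 0 := by
  refine le_antisymm ?_ ?_
  · exact pv_foldl_max_le (pv_le_foldl_max 0 l') (fun x hx => pv_mem_le_foldl_max ((h x).1 hx) 0)
  · exact pv_foldl_max_le (pv_le_foldl_max 0 l) (fun x hx => pv_mem_le_foldl_max ((h x).2 hx) 0)

-- the max of the per-element terms (if k = p then r else 0) + count t k
def pvMx (p : String) (r : Int) (t : List String) : Int :=
  ((p :: t).map (fun k => (if k = p then r else 0) + (t.count k : Int))).foldl max 0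

-- The scan over a sorted tail computes the max of "extended run" terms.
theorem pv_scan_sorted (t : List String) (p : String) (r b : Int)
    (hs : t.Pairwise (· ≤ ·)) (hge : ∀ x ∈ t, p ≤ x)
    (hr : 0 ≤ r) (hrb : r ≤ b) :
    pvScan (some p) r b t = max b (pvMx p r t) := by
  induction t generalizing p r b with
  | nil =>
    simp only [pvScan, pvMx, List.map_cons, List.map_nil, List.count_nil]
    rw [pv_foldl_max_cons]
    simp only [if_pos rfl, List.foldl_nil]
    omega
  | cons s t ih =>
    have hps : p ≤ s := hge s (by simp)
    have hst : ∀ x ∈ t, s ≤ x := fun x hx => (List.pairwise_cons.1 hs).1 x hx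
    have hts : t.Pairwise (· ≤ ·) := (List.pairwise_cons.1 hs).2
    by_cases hsp : s = p
    · subst hsp
      have hcond : (some s == some s) = true := by simp
      rw [pvScan, hcond, if_pos rfl]
      have hbest : (if r + 1 > b then r + 1 else b) = max b (r + 1) := by omega
      rw [hbest, ih s (r + 1) (max b (r + 1)) hts hst (by omega) (le_max_right _ _)]
      have hfun : (fun k => (if k = s then r else 0) + ((s :: t).count k : Int))
          = (fun k => (if k = s then r + 1 else 0) + ((t.count k : Nat) : Int)) := by
        funext k
        by_cases hk : k = s
        · subst hk
          simp only [List.count_cons, beq_self_eq_true, if_true, if_pos rfl]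
          push_cast; omega
        · simp [List.count_cons, hk, Ne.symm hk]
      have hexp : pvMx s (r + 1) t
          = max ((if s = s then r + 1 else 0) + (t.count s : Int))
              ((t.map (fun k => (if k = s then r + 1 else 0) + ((t.count k : Nat) : Int))).foldl max 0) := by
        unfold pvMx
        rw [List.map_cons, pv_foldl_max_cons]
      have hX : r + 1 ≤ pvMx s (r + 1) t := by
        rw [hexp]
        have hd : (if s = s then r + 1 else (0:Int)) = r + 1 := by simp
        rw [hd]
        have h0 : (0 : Int) ≤ (t.count s : Int) := by positivity
        exact le_trans (by omega) (le_max_left _ _)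
      have hMx : pvMx s r (s :: t) = pvMx s (r + 1) t := by
        unfold pvMx
        rw [hfun, List.map_cons, List.map_cons, pv_foldl_max_cons]
        refine max_eq_right ?_
        exact pv_mem_le_foldl_max (by exact List.mem_cons_self) 0
      rw [hMx, max_assoc, max_eq_right hX]
    · have hlt : p < s := lt_of_le_of_ne hps (fun h => hsp h.symm)
      have hcond : (some s == some p) = false := by simp [hsp]
      rw [pvScan, hcond]
      simp only [Bool.false_eq_true, if_false]
      have hbest : (if (1:Int) > b then 1 else b) = max b 1 := by omega
      rw [hbest, ih s 1 (max b 1) hts hst (by omega) (le_max_right _ _)]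
      have hnot : p ∉ s :: t := by
        intro hmem
        rcases List.mem_cons.1 hmem with rfl | hmem'
        · exact absurd rfl hsp
        · exact absurd (hst p hmem') (not_le.2 hlt)
      have hcnt0 : (s :: t).count p = 0 := List.count_eq_zero.2 hnot
      have hmap : (s :: t).map (fun k => (if k = p then r else 0) + ((s :: t).count k : Int))
          = (s :: t).map (fun k => (if k = s then (1:Int) else 0) + ((t.count k : Nat) : Int)) := by
        apply List.map_congr_left
        intro k hk
        have hkp : k ≠ p := by
          intro h; subst h; exact hnot hk
        by_cases hks : k = s
        · subst hks
          simp only [List.count_cons, beq_self_eq_true, if_true, if_neg hkp, if_pos rfl]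
          push_cast; omega
        · simp [List.count_cons, hkp, hks, Ne.symm hks]
      have hMx : pvMx p r (s :: t) = max r (pvMx s 1 t) := by
        unfold pvMx
        rw [List.map_cons, pv_foldl_max_cons, hmap]
        congr 1
        simp [hcnt0]
      have hexp : pvMx s 1 t
          = max ((if s = s then (1:Int) else 0) + (t.count s : Int))
              ((t.map (fun k => (if k = s then (1:Int) else 0) + ((t.count k : Nat) : Int))).foldl max 0) := by
        unfold pvMx
        rw [List.map_cons, pv_foldl_max_cons]
      have hX : (1:Int) ≤ pvMx s 1 t := by
        rw [hexp]
        have hd : (if s = s then (1:Int) else 0) = 1 := by simp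
        rw [hd]
        have h0 : (0 : Int) ≤ (t.count s : Int) := by positivity
        exact le_trans (by omega) (le_max_left _ _)
      rw [hMx, max_assoc b 1, max_eq_right hX, ← max_assoc b r, max_eq_left hrb]

-- B's scan over the sorted flattened senses computes the max count.
theorem pv_scan_eq (S : List String) :
    pvScan none 0 0 (PySem.List.sorted S (fun s => s) false)
      = ((PySem.Set.ofList S).map (fun k => (S.count k : Int))).foldl max 0 := by
  rcases hSS : PySem.List.sorted S (fun s => s) false with _ | ⟨s, t⟩
  · have hS : S = [] := by
      have := PySem.List.sorted_eq_nil_iff (xs := S) (key := fun s => s) (rev := false)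
      exact this.1 hSS
    subst hS
    simp [pvScan, PySem.Set.ofList]
  · have hperm : (s :: t).Perm S := hSS ▸ PySem.List.sorted_perm S (fun s => s) false
    have hpw : (s :: t).Pairwise (· ≤ ·) := by
      have h := PySem.List.sorted_pairwise (xs := S) (key := fun s => s)
      rw [hSS] at h
      exact h
    have hst : ∀ x ∈ t, s ≤ x := fun x hx => (List.pairwise_cons.1 hpw).1 x hx
    have hts : t.Pairwise (· ≤ ·) := (List.pairwise_cons.1 hpw).2
    have hstep : pvScan none 0 0 (s :: t) = pvScan (some s) 1 1 t := by
      rw [pvScan]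
      norm_num
    rw [hstep, pv_scan_sorted t s 1 1 hts hst (by omega) (by omega)]
    have hfun : (s :: t).map (fun k => (if k = s then (1:Int) else 0) + ((t.count k : Nat) : Int))
        = (s :: t).map (fun k => (S.count k : Int)) := by
      apply List.map_congr_left
      intro k _
      rw [← hperm.count_eq k]
      by_cases hk : k = s
      · subst hk
        simp only [List.count_cons, beq_self_eq_true, if_true, if_pos rfl]
        push_cast; omega
      · simp [List.count_cons, hk, Ne.symm hk]
    have hMx : pvMx s 1 t = ((s :: t).map (fun k => (S.count k : Int))).foldl max 0 := by
      unfold pvMx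
      rw [hfun]
    have hsS : s ∈ S := hperm.mem_iff.1 (by simp)
    have hX : (1:Int) ≤ ((s :: t).map (fun k => (S.count k : Int))).foldl max 0 := by
      refine le_trans ?_ (pv_mem_le_foldl_max (x := (S.count s : Int))
        (by exact List.mem_map_of_mem List.mem_cons_self) 0)
      exact_mod_cast List.count_pos_iff.2 hsS
    rw [hMx, max_eq_right hX]
    apply pv_foldl_max_eq_of_mem_iff
    intro x
    simp only [List.mem_map]
    constructor
    · rintro ⟨k, hk, rfl⟩
      exact ⟨k, (PySem.Set.mem_ofList S k).2 (hperm.mem_iff.1 hk), rfl⟩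
    · rintro ⟨k, hk, rfl⟩
      exact ⟨k, hperm.mem_iff.2 ((PySem.Set.mem_ofList S k).1 hk), rfl⟩

-- A's per-distinct-sense max-of-count loop as a foldl max over mapped counts.
theorem pv_A_max (S : List String) :
    (PySem.Set.ofList S).foldl
        (fun m sense =>
          let count : Int := PySem.List.count S sense
          if count > m then count else m) 0
      = ((PySem.Set.ofList S).map (fun k => (S.count k : Int))).foldl max 0 := by
  have hf : (fun (m : Int) (sense : String) =>
        let count : Int := PySem.List.count S sense
        if count > m then count else m)
      = fun m k => max m ((S.count k : Int)) := by
    funext m k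
    simp only [PySem.List.count_eq]
    rcases le_total ((S.count k : Int)) m with h | h
    · simp [not_lt.2 h, max_eq_left h]
    · rcases lt_or_eq_of_le h with h' | h'
      · simp [h', max_eq_right h]
      · simp [← h', max_self]
  rw [List.foldl_map, hf]

-- ===== VERDICT (by name: the statement is the Claim_ definition above) =====
theorem one_sense_used_spec : Claim_equal_one_sense_used := by
  intro lijst _
  unfold Spec_one_sense_used one_sense_used one_sense_used_alt
  simp only [pv_flatten_A, List.nil_append, pv_A_max, pv_scan_eq]
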